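-- pv_equiv track=rewrite | github.com/Mattyd626/Advent-Of-Code | 2023/day3.py | part_1
-- ===== SOURCE A (Python) =====
-- def part_1(input):
--     for index in range(len(input)):
--         input[index] = input[index].strip()
--     width = len(input[0])
--     height =  len(input)
--     valid_map = [False]*width*height
--
--     for y in range(height):
--         for x in range(width):
--             if input[y][x] not in ".0123456789":
--                 for x1 in range(-1,2):
--                     for y1 in range(-1,2):
--                         if x + x1 > -1 and x + x1 < width and y + y1 > -1 and y + y1 < height:
--                             valid_map[x+x1+(y+y1)*width] = True
--
--     valid_sum = 0
--     number = ""
--     number_valid = False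
--     for y in range(height):
--         for x in range(width):
--             if input[y][x] in "0123456789":
--                 number = number + input[y][x]
--                 if valid_map[x+y*width]:
--                     number_valid = True
--             elif number_valid:
--                 valid_sum += int(number)
--                 number_valid = False
--                 number = ""
--             else:
--                 number = ""
--     return valid_sum
-- ===== SOURCE B (Python) =====
-- def part_1(input):
--     for index in range(len(input)):
--         input[index] = input[index].strip()
--     width = len(input[0])
--     height = len(input)
--
--     def has_symbol_neighbor(y, x):
--         return any(
--             0 <= y + dy < height and 0 <= x + dx < width
--             and input[y + dy][x + dx] not in ".0123456789"
--             for dy in (-1, 0, 1) for dx in (-1, 0, 1))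
--
--     valid_sum = 0
--     number = ""
--     number_valid = False
--     for y in range(height):
--         for x in range(width):
--             c = input[y][x]
--             if c in "0123456789":
--                 number += c
--                 number_valid = number_valid or has_symbol_neighbor(y, x)
--             elif number_valid:
--                 valid_sum += int(number)
--                 number_valid = False
--                 number = ""
--             else:
--                 number = ""
--     return valid_sum
-- ===== Notes on version B (the rewrite author's own statement) =====
-- stated objective: simpler
-- what changed: Drops A's precomputed width*height valid_map table (a full first pass marking every neighbor of every symbol) and instead decides validity with an on-the-fly 8-neighbor symbol scan at each digit cell, in a single pass.
import Mathlib
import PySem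

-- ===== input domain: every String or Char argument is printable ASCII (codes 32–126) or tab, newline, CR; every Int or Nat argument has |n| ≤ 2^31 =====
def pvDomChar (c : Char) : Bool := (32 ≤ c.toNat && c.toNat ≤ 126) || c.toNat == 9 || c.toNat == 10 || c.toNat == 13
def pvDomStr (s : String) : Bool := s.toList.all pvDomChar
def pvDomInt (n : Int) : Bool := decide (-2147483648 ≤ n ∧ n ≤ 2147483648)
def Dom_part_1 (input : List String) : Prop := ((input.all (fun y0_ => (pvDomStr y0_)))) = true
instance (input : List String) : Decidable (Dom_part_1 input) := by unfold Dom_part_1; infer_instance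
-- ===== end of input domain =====

-- B replaces A's precomputed valid_map table by a per-digit-cell 8-neighbor symbol scan ("simpler");
-- A strips the input list's strings IN PLACE (the caller can observe that mutation); B performs the same mutation,
-- and the equivalence proved here is about the RETURN value only.

-- ===== PORT A =====
-- input[y][x] on the stripped rows (both Pythons write exactly this access; defaults are unreachable under Pre_)
def cellAt (rows : List (List Char)) (y x : Int) : Char :=
  PySem.List.pyGetD (PySem.List.pyGetD rows y []) x ' '

-- the inner x1/y1 double loop of A that marks the 3×3 block around symbol cell (y,x)
def markCellA (width height x y : Int) (vm : List Bool) : List Bool :=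
  (PySem.List.pyRange (-1) 2 1).foldl (fun vm x1 =>
    (PySem.List.pyRange (-1) 2 1).foldl (fun vm y1 =>
      if x + x1 > -1 ∧ x + x1 < width ∧ y + y1 > -1 ∧ y + y1 < height then
        vm.set (x + x1 + (y + y1) * width).toNat true
      else vm) vm) vm

-- A's first pass: valid_map
def buildMapA (rows : List (List Char)) (width height : Int) : List Bool :=
  (PySem.List.pyRange 0 height 1).foldl (fun vm y =>
    (PySem.List.pyRange 0 width 1).foldl (fun vm x =>
      if ¬ (".0123456789".toList.contains (cellAt rows y x)) then
        markCellA width height x y vm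
      else vm) vm)
    (List.replicate (width * height).toNat false)

def part_1 (input : List String) : Int :=
  let rows : List (List Char) := input.map (fun s => (PySem.Str.strip s).toList)
  let width : Int := (rows.headD []).length
  let height : Int := rows.length
  let valid_map := buildMapA rows width height
  let st := (PySem.List.pyRange 0 height 1).foldl (fun (st : Int × List Char × Bool) y =>
    (PySem.List.pyRange 0 width 1).foldl (fun (st : Int × List Char × Bool) x =>
      if "0123456789".toList.contains (cellAt rows y x) then
        (st.1, st.2.1 ++ [cellAt rows y x],
          if PySem.List.pyGetD valid_map (x + y * width) false then true else st.2.2)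
      else if st.2.2 then
        (st.1 + (PySem.Int.ofChars? st.2.1).getD 0, [], false)
      else
        (st.1, [], st.2.2)) st) ((0 : Int), ([] : List Char), false)
  st.1

-- ===== PORT B =====
-- B's helper: does any of the 8 neighbors (or the cell itself) hold a symbol?
def hasSymNbr (rows : List (List Char)) (width height y x : Int) : Bool :=
  [(-1 : Int), 0, 1].any (fun dy =>
    [(-1 : Int), 0, 1].any (fun dx =>
      decide (0 ≤ y + dy) && decide (y + dy < height) &&
      decide (0 ≤ x + dx) && decide (x + dx < width) &&
      ! (".0123456789".toList.contains (cellAt rows (y + dy) (x + dx)))))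

def part_1_alt (input : List String) : Int :=
  let rows : List (List Char) := input.map (fun s => (PySem.Str.strip s).toList)
  let width : Int := (rows.headD []).length
  let height : Int := rows.length
  let st := (PySem.List.pyRange 0 height 1).foldl (fun (st : Int × List Char × Bool) y =>
    (PySem.List.pyRange 0 width 1).foldl (fun (st : Int × List Char × Bool) x =>
      if "0123456789".toList.contains (cellAt rows y x) then
        (st.1, st.2.1 ++ [cellAt rows y x], st.2.2 || hasSymNbr rows width height y x)
      else if st.2.2 then
        (st.1 + (PySem.Int.ofChars? st.2.1).getD 0, [], false)
      else
        (st.1, [], st.2.2)) st) ((0 : Int), ([] : List Char), false)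
  st.1

-- ===== PRECONDITION & SPEC =====
-- Pre_ excludes exactly the inputs where Python A raises IndexError: the empty list (input[0])
-- and inputs with a stripped row shorter than the first stripped row (input[y][x] for x < width).
def Pre_part_1 (input : List String) : Prop :=
  input ≠ [] ∧ ∀ s ∈ input,
    (PySem.Chars.strip ((input.headD "").toList)).length ≤ (PySem.Chars.strip s.toList).length
instance (input : List String) : Decidable (Pre_part_1 input) := by unfold Pre_part_1; infer_instance

def pvWitness_part_1 : List String := ["467..114", "...*...."]

def Spec_part_1 (input : List String) (out : Int) : Prop := out = part_1_alt input
instance (input : List String) (out : Int) : Decidable (Spec_part_1 input out) := by unfold Spec_part_1; infer_instance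

-- ===== CLAIM (what is proved, stated in full; the proofs are below) =====
def Claim_equal_part_1 : Prop := ∀ (input : List String), Dom_part_1 input → Pre_part_1 input → Spec_part_1 input (part_1 input)



-- ===== LEMMAS AND PROOFS =====

-- generic invariant: a fold whose every step preserves length L and can only OR new truth into slot i
lemma foldl_getD_or {α : Type} (l : List α) (step : List Bool → α → List Bool)
    (f : α → Bool) (L i : Nat)
    (h : ∀ vm e, vm.length = L → e ∈ l →
        (step vm e).length = L ∧ (step vm e).getD i false = (vm.getD i false || f e)) :
    ∀ vm, vm.length = L → (l.foldl step vm).length = L ∧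
      (l.foldl step vm).getD i false = (vm.getD i false || l.any f) := by
  induction l with
  | nil => intro vm hvm; simpa using hvm
  | cons a t ih =>
    intro vm hvm
    obtain ⟨hl, hg⟩ := h vm a hvm (by simp)
    obtain ⟨hl2, hg2⟩ := ih (fun vm e hm he => h vm e hm (by simp [he])) (step vm a) hl
    refine ⟨hl2, ?_⟩
    rw [List.foldl_cons, hg2, hg, List.any_cons, Bool.or_assoc]

lemma getD_set_true (vm : List Bool) (j i : Nat) (hj : j < vm.length) :
    (vm.set j true).getD i false = (vm.getD i false || (j == i)) := by
  by_cases hji : j = i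
  · subst hji; simp [List.getD, hj]
  · simp [List.getD, List.getElem?_set_ne hji, hji]

-- does A's marking from symbol cell (y,x) hit flat index i?
def nbrTouch (width height x y : Int) (i : Nat) : Bool :=
  (PySem.List.pyRange (-1) 2 1).any (fun x1 => (PySem.List.pyRange (-1) 2 1).any (fun y1 =>
    decide (x + x1 > -1 ∧ x + x1 < width ∧ y + y1 > -1 ∧ y + y1 < height) &&
    ((x + x1 + (y + y1) * width).toNat == i)))

lemma markCellA_getD (w h : Nat) (x y : Int) (i : Nat) :
    ∀ vm, vm.length = w * h →
      (markCellA w h x y vm).length = w * h ∧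
      (markCellA w h x y vm).getD i false = (vm.getD i false || nbrTouch w h x y i) := by
  intro vm hvm
  unfold markCellA nbrTouch
  refine foldl_getD_or _ _ _ (w * h) i ?_ vm hvm
  intro vm x1 hvm hx1
  refine foldl_getD_or _ _ _ (w * h) i ?_ vm hvm
  intro vm y1 hvm hy1
  split_ifs with hc
  · obtain ⟨h1, h2, h3, h4⟩ := hc
    have hidx : x + x1 + (y + y1) * (w : Int) < (w : Int) * (h : Int) := by
      calc x + x1 + (y + y1) * (w : Int) < (w : Int) + (y + y1) * (w : Int) := by omega
        _ = ((y + y1) + 1) * (w : Int) := by ring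
        _ ≤ (h : Int) * (w : Int) := by
            apply mul_le_mul_of_nonneg_right (by omega) (by positivity)
        _ = (w : Int) * (h : Int) := by ring
    have hj : (x + x1 + (y + y1) * (w : Int)).toNat < vm.length := by
      have hcast : ((w * h : Nat) : Int) = (w : Int) * (h : Int) := by push_cast; ring
      have h5 : x + x1 + (y + y1) * (w : Int) < ((w * h : Nat) : Int) := by rw [hcast]; exact hidx
      have hj0 : 0 ≤ (y + y1) * (w : Int) := mul_nonneg (by omega) (by positivity)
      omega
    refine ⟨by simpa using hvm, ?_⟩
    rw [getD_set_true vm _ i hj]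
    simp [h1, h2, h3, h4]
  · exact ⟨hvm, by simp [hc]⟩

def symBool (rows : List (List Char)) (y x : Int) : Bool :=
  ! (".0123456789".toList.contains (cellAt rows y x))

lemma buildMapA_getD (rows : List (List Char)) (w h : Nat) (i : Nat) :
    (buildMapA rows w h).getD i false =
      (PySem.List.pyRange 0 h 1).any (fun y => (PySem.List.pyRange 0 w 1).any (fun x =>
        symBool rows y x && nbrTouch w h x y i)) := by
  unfold buildMapA
  have hrep : (List.replicate ((w : Int) * (h : Int)).toNat false).length = w * h := by
    simp; omega
  have hstep : ∀ (vm : List Bool) (y : Int), vm.length = w * h →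
      y ∈ PySem.List.pyRange 0 (h : Int) 1 →
      (((PySem.List.pyRange 0 (w : Int) 1).foldl (fun vm x =>
          if ¬ (".0123456789".toList.contains (cellAt rows y x)) then
            markCellA w h x y vm
          else vm) vm).length = w * h ∧
       ((PySem.List.pyRange 0 (w : Int) 1).foldl (fun vm x =>
          if ¬ (".0123456789".toList.contains (cellAt rows y x)) then
            markCellA w h x y vm
          else vm) vm).getD i false =
        (vm.getD i false || (PySem.List.pyRange 0 (w : Int) 1).any (fun x =>
          symBool rows y x && nbrTouch w h x y i))) := by
    intro vm y hvm hy
    refine foldl_getD_or _ _ _ (w * h) i ?_ vm hvm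
    intro vm x hvm hx
    split_ifs with hc
    · -- the cell is '.' or a digit: no marking, and symBool is false
      refine ⟨hvm, ?_⟩
      have hsb : symBool rows y x = false := by
        unfold symBool
        rw [hc]
        rfl
      rw [hsb]
      simp
    · -- a symbol cell: markCellA runs, and symBool is true
      obtain ⟨hl, hg⟩ := markCellA_getD w h x y i vm hvm
      refine ⟨hl, ?_⟩
      rw [hg]
      have hcf : ".0123456789".toList.contains (cellAt rows y x) = false := by
        simpa using hc
      have hsb : symBool rows y x = true := by
        unfold symBool
        rw [hcf]
        rfl
      rw [hsb]
      simp
  have hmain := foldl_getD_or _ _ _ (w * h) i hstep _ hrep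
  rw [hmain.2]
  have hz : (List.replicate ((w : Int) * (h : Int)).toNat false).getD i false = false := by
    unfold List.getD
    rw [List.getElem?_replicate]
    split <;> rfl
  rw [hz, Bool.false_or]

lemma decode (w a c b d : Int) (ha : 0 ≤ a) (ha' : a < w) (hc : 0 ≤ c) (hc' : c < w)
    (heq : a + b * w = c + d * w) : a = c ∧ b = d := by
  have hw : 0 < w := lt_of_le_of_lt ha ha'
  have h3 : a - c = (d - b) * w := by linear_combination heq
  have hbd : b = d := by
    rcases lt_trichotomy b d with h1 | h1 | h1
    · exfalso
      have h2 : w ≤ (d - b) * w := le_mul_of_one_le_left hw.le (by omega)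
      omega
    · exact h1
    · exfalso
      have h2 : (d - b) * w ≤ -w := by
        have hmm : (d - b) * w ≤ (-1) * w := mul_le_mul_of_nonneg_right (by omega) hw.le
        linarith
      omega
  subst hbd
  exact ⟨by omega, rfl⟩

-- the key bridge: A's valid_map cell (y,x) = B's on-the-fly neighbor scan
lemma map_eq_hasSymNbr (rows : List (List Char)) (w h : Nat) (y x : Int)
    (hy : 0 ≤ y) (hy' : y < (h : Int)) (hx : 0 ≤ x) (hx' : x < (w : Int)) :
    (buildMapA rows w h).getD ((x + y * (w : Int)).toNat) false = hasSymNbr rows w h y x := by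
  rw [buildMapA_getD]
  rw [Bool.eq_iff_iff]
  unfold hasSymNbr nbrTouch symBool
  simp only [List.any_eq_true, PySem.List.mem_pyRange_one, List.mem_cons,
    List.not_mem_nil, or_false, Bool.and_eq_true, decide_eq_true_eq, beq_iff_eq,
    Bool.not_eq_true']
  constructor
  · rintro ⟨y', ⟨hy'0, hy'h⟩, x', ⟨hx'0, hx'w⟩, hsym, x1, ⟨hx1a, hx1b⟩, y1, ⟨hy1a, hy1b⟩,
      ⟨c1, c2, c3, c4⟩, hti⟩
    have hnn1 : 0 ≤ (y' + y1) * (w : Int) := mul_nonneg (by omega) (by positivity)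
    have hnn2 : 0 ≤ y * (w : Int) := mul_nonneg hy (by positivity)
    have hEq : x' + x1 + (y' + y1) * (w : Int) = x + y * (w : Int) := by omega
    obtain ⟨hxx, hyy⟩ := decode (w : Int) (x' + x1) x (y' + y1) y (by omega) (by omega) hx hx' hEq
    refine ⟨-y1, by omega, -x1, by omega, ⟨⟨⟨by omega, by omega⟩, by omega⟩, by omega⟩, ?_⟩
    have e1 : y + -y1 = y' := by omega
    have e2 : x + -x1 = x' := by omega
    rw [e1, e2]; exact hsym
  · rintro ⟨dy, hdy, dx, hdx, ⟨⟨⟨b1, b2⟩, b3⟩, b4⟩, hsym⟩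
    refine ⟨y + dy, ⟨b1, b2⟩, x + dx, ⟨b3, b4⟩, hsym, -dx, ⟨by omega, by omega⟩,
      -dy, ⟨by omega, by omega⟩, ⟨by omega, by omega, by omega, by omega⟩, ?_⟩
    rw [show x + dx + -dx + (y + dy + -dy) * (w : Int) = x + y * (w : Int) from by ring]

-- the second passes of the two ports agree (the only difference is the validity test at digit cells)
lemma pass2_eq (rows : List (List Char)) (w h : Nat) :
    ((PySem.List.pyRange 0 (h : Int) 1).foldl (fun (st : Int × List Char × Bool) y =>
      (PySem.List.pyRange 0 (w : Int) 1).foldl (fun (st : Int × List Char × Bool) x =>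
        if "0123456789".toList.contains (cellAt rows y x) then
          (st.1, st.2.1 ++ [cellAt rows y x],
            if PySem.List.pyGetD (buildMapA rows w h) (x + y * (w : Int)) false then true else st.2.2)
        else if st.2.2 then
          (st.1 + (PySem.Int.ofChars? st.2.1).getD 0, [], false)
        else
          (st.1, [], st.2.2)) st) ((0 : Int), ([] : List Char), false)).1
    = ((PySem.List.pyRange 0 (h : Int) 1).foldl (fun (st : Int × List Char × Bool) y =>
      (PySem.List.pyRange 0 (w : Int) 1).foldl (fun (st : Int × List Char × Bool) x =>
        if "0123456789".toList.contains (cellAt rows y x) then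
          (st.1, st.2.1 ++ [cellAt rows y x], st.2.2 || hasSymNbr rows w h y x)
        else if st.2.2 then
          (st.1 + (PySem.Int.ofChars? st.2.1).getD 0, [], false)
        else
          (st.1, [], st.2.2)) st) ((0 : Int), ([] : List Char), false)).1 := by
  refine congrArg Prod.fst ?_
  apply PySem.List.foldl_congr_mem'
  intro y hy st
  apply PySem.List.foldl_congr_mem'
  intro x hx st
  rw [PySem.List.mem_pyRange_one] at hy hx
  by_cases hc : "0123456789".toList.contains (cellAt rows y x)
  · have hnn : 0 ≤ x + y * (w : Int) := by
      have : 0 ≤ y * (w : Int) := mul_nonneg hy.1 (by positivity)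
      omega
    have hpg : PySem.List.pyGetD (buildMapA rows w h) (x + y * (w : Int)) false
        = (buildMapA rows w h).getD ((x + y * (w : Int)).toNat) false :=
      PySem.List.pyGetD_of_nonneg _ _ hnn
    rw [if_pos hc, if_pos hc, hpg, map_eq_hasSymNbr rows w h y x hy.1 hy.2 hx.1 hx.2]
    cases hs : hasSymNbr rows w h y x <;> simp
  · rw [if_neg hc, if_neg hc]

-- ===== VERDICT (by name: the statement is the Claim_ definition above) =====
theorem part_1_spec : Claim_equal_part_1 := by
  intro input _ _
  show part_1 input = part_1_alt input
  exact pass2_eq (input.map (fun s => (PySem.Str.strip s).toList))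
    ((input.map (fun s => (PySem.Str.strip s).toList)).headD []).length
    (input.map (fun s => (PySem.Str.strip s).toList)).length
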